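-- pv_equiv track=rewrite | github.com/exigosss/randomTeamPickerGUI | randomteamPickerGui.py | calculateTeamDistribution
-- ===== SOURCE A (Python) =====
-- import math
--
-- def calculateTeamDistribution(numOfMembers, numOfTeams):
--     teamSize = []
--     lastEvenSize = 0
--     mathSize = math.ceil(numOfMembers / numOfTeams)
--     for i in range(numOfMembers, 0, -1):
--         if i % numOfTeams == 0:
--             lastEvenSize = i
--             break
--
--     for i in range(0, numOfTeams):
--         teamSize.append(int(lastEvenSize / numOfTeams))
--
--     while not sum(teamSize) == numOfMembers:
--         minEle = min(teamSize)
--         idx = teamSize.index(minEle)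
--         teamSize[idx] = teamSize[idx] + 1
--     return teamSize
-- ===== SOURCE B (Python) =====
-- def calculateTeamDistribution(numOfMembers, numOfTeams):
--     base = numOfMembers // numOfTeams
--     rem = numOfMembers % numOfTeams
--     return [base + 1] * rem + [base] * (numOfTeams - rem)
-- ===== Notes on version B (the rewrite author's own statement) =====
-- stated objective: faster
-- what changed: Replaces A's downward scan for the last multiple, its append loop and its repeated min/index/increment passes of the while loop by the closed-form divmod: first n%t teams get n//t+1 members, the rest n//t.
import Mathlib
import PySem

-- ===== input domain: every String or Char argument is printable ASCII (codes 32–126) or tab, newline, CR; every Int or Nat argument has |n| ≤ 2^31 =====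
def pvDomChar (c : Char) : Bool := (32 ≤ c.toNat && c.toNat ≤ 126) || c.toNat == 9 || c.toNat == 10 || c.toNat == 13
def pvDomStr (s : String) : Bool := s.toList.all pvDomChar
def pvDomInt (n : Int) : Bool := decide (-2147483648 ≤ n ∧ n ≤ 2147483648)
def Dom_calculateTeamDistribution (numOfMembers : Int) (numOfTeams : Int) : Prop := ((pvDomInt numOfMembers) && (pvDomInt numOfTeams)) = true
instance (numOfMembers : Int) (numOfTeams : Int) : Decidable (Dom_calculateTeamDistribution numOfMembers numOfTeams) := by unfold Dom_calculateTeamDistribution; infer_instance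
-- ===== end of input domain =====

-- B replaces A's scan-for-multiple, append loop and repeated min/index/increment passes by the
-- closed-form divmod distribution (objective: faster).

-- ===== PORT A =====
-- first loop: 'for i in range(numOfMembers, 0, -1): if i % numOfTeams == 0: lastEvenSize = i; break'
-- ported as the countdown it is (i = n+1, n, ..., 1, stopping at the break; like Python's lazy
-- range, it does not materialize the range); returns the initial value 0 when nothing breaks
def pvFindLastEven (t : Int) : Nat → Int
  | 0 => 0
  | n + 1 => if PySem.Int.mod ((n : Int) + 1) t = 0 then (n : Int) + 1 else pvFindLastEven t n

-- 'while not sum(teamSize) == numOfMembers: minEle = min(teamSize); idx = teamSize.index(minEle);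
--  teamSize[idx] = teamSize[idx] + 1'. The loop is not structurally recursive; fuel bounds the
-- iteration count (each pass raises the sum by 1, so numOfMembers.toNat + 1 passes suffice on
-- every input where the Python loop terminates). 'none' branches are Python's ValueError on
-- min([]) — excluded by Pre_.
def pvAdjust (m : Int) : Nat → List Int → List Int
  | 0, ts => ts
  | fuel + 1, ts =>
    if ts.sum = m then ts
    else
      match PySem.List.min? ts (fun x => x) with
      | none => ts
      | some mn =>
        match PySem.List.index? ts mn with
        | none => ts
        | some idx => pvAdjust m fuel (ts.set idx (ts.getD idx 0 + 1))

def calculateTeamDistribution (numOfMembers : Int) (numOfTeams : Int) : List Int :=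
  -- mathSize = math.ceil(...) is computed and never read; omitted.
  let lastEvenSize := pvFindLastEven numOfTeams numOfMembers.toNat
  -- 'int(lastEvenSize / numOfTeams)': float division then truncation; exact as truncdiv on |n| ≤ 2^31
  let teamSize := (PySem.List.pyRange 0 numOfTeams 1).foldl
      (fun acc _ => acc ++ [PySem.Int.truncdiv lastEvenSize numOfTeams]) []
  pvAdjust numOfMembers (numOfMembers.toNat + 1) teamSize

-- ===== PORT B =====
def calculateTeamDistribution_alt (numOfMembers : Int) (numOfTeams : Int) : List Int :=
  let base := PySem.Int.floordiv numOfMembers numOfTeams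
  let rem := PySem.Int.mod numOfMembers numOfTeams
  List.replicate rem.toNat (base + 1) ++ List.replicate (numOfTeams - rem).toNat base

-- ===== PRECONDITION & SPEC =====
-- Pre_ is exactly the set of inputs on which A returns: it excludes numOfTeams = 0
-- (ZeroDivisionError), numOfTeams < 0 with numOfMembers ≠ 0 (ValueError: min of the empty list),
-- and numOfMembers < 0 with numOfTeams ≥ 1 (the while loop never terminates); the remaining
-- corner numOfMembers = 0 ∧ numOfTeams < 0, on which A returns [], stays inside Pre_.
def Pre_calculateTeamDistribution (numOfMembers : Int) (numOfTeams : Int) : Prop :=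
  (0 ≤ numOfMembers ∧ 1 ≤ numOfTeams) ∨ (numOfMembers = 0 ∧ numOfTeams < 0)
instance (numOfMembers : Int) (numOfTeams : Int) : Decidable (Pre_calculateTeamDistribution numOfMembers numOfTeams) := by unfold Pre_calculateTeamDistribution; infer_instance

def pvWitness_calculateTeamDistribution : Int × Int := (7, 3)

def Spec_calculateTeamDistribution (numOfMembers : Int) (numOfTeams : Int) (out : List Int) : Prop := out = calculateTeamDistribution_alt numOfMembers numOfTeams
instance (numOfMembers : Int) (numOfTeams : Int) (out : List Int) : Decidable (Spec_calculateTeamDistribution numOfMembers numOfTeams out) := by unfold Spec_calculateTeamDistribution; infer_instance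

-- ===== CLAIM (what is proved, stated in full; the proofs are below) =====
def Claim_equal_calculateTeamDistribution : Prop := ∀ (numOfMembers : Int) (numOfTeams : Int), Dom_calculateTeamDistribution numOfMembers numOfTeams → Pre_calculateTeamDistribution numOfMembers numOfTeams → Spec_calculateTeamDistribution numOfMembers numOfTeams (calculateTeamDistribution numOfMembers numOfTeams)

-- ===== LEMMAS AND PROOFS =====

-- the first loop finds the largest multiple of t in [1, n], i.e. t * (n / t) (0 when n < t)
lemma findLastEven_eq (t : Int) (ht : 0 < t) :
    ∀ (n : Nat), pvFindLastEven t n = t * ((n : Int) / t) := by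
  intro n
  induction n with
  | zero => simp [pvFindLastEven]
  | succ n ih =>
    simp only [pvFindLastEven]
    push_cast
    set m : Int := (n : Int) + 1 with hm
    have h0 : 0 < m := by omega
    by_cases hd : t ∣ m
    · rw [if_pos ((PySem.Int.mod_eq_zero_iff_dvd m t).mpr hd)]
      exact (Int.ediv_mul_cancel hd).symm.trans (mul_comm _ _)
    · rw [if_neg (fun hc => hd ((PySem.Int.mod_eq_zero_iff_dvd m t).mp hc))]
      rw [ih]
      have hn : (n : Int) = m - 1 := by omega
      rw [hn]
      congr 1
      have he := Int.mul_ediv_add_emod m t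
      have he2 := Int.mul_ediv_add_emod (m-1) t
      have hlt := Int.emod_lt_of_pos m ht
      have hge : 1 ≤ m % t := by
        rcases (Int.emod_nonneg m (by omega) : 0 ≤ m % t).lt_or_eq with h' | h'
        · omega
        · exact absurd (Int.dvd_of_emod_eq_zero h'.symm) hd
      have hlt2 := Int.emod_lt_of_pos (m-1) ht
      have hge2 := Int.emod_nonneg (m-1) (by omega : t ≠ 0)
      nlinarith [he, he2]

-- the while loop's state after k increments: k teams of size q+1 then tn-k of size q
def pvState (k tn : Nat) (q : Int) : List Int :=
  List.replicate k (q + 1) ++ List.replicate (tn - k) q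

lemma sum_pvState (k tn : Nat) (q : Int) (hk : k ≤ tn) :
    (pvState k tn q).sum = tn * q + k := by
  simp [pvState, List.sum_replicate, mul_add]
  push_cast [Nat.cast_sub hk]
  ring

lemma index?_replicate_cons (k : Nat) (q : Int) (rest : List Int) :
    PySem.List.index? (List.replicate k (q+1) ++ q :: rest) q = some k := by
  induction k with
  | zero => simpa using PySem.List.index?_cons_self _ _
  | succ n ih =>
    rw [List.replicate_succ, List.cons_append,
      PySem.List.index?_cons_of_ne _ (by omega), ih]
    rfl

lemma index?_pvState (k tn : Nat) (q : Int) (hk : k < tn) :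
    PySem.List.index? (pvState k tn q) q = some k := by
  unfold pvState
  obtain ⟨j, hj⟩ : ∃ j, tn - k = j + 1 := ⟨tn - k - 1, by omega⟩
  rw [hj, List.replicate_succ]
  exact index?_replicate_cons k q _

lemma min?_pvState (k tn : Nat) (q : Int) (hk : k < tn) :
    PySem.List.min? (pvState k tn q) (fun x => x) = some q := by
  have hmem : q ∈ pvState k tn q := by
    unfold pvState
    simp
    omega
  have hne : pvState k tn q ≠ [] := by intro h; rw [h] at hmem; simp at hmem
  obtain ⟨mn, hmn⟩ : ∃ mn, PySem.List.min? (pvState k tn q) (fun x => x) = some mn := by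
    cases h : PySem.List.min? (pvState k tn q) (fun x => x) with
    | none => exact absurd ((PySem.List.min?_eq_none_iff _ _).mp h) hne
    | some mn => exact ⟨mn, rfl⟩
  have h1 := PySem.List.min?_isMin hmn q hmem
  have h2 : mn ∈ pvState k tn q := PySem.List.min?_mem hmn
  have h3 : mn = q + 1 ∨ mn = q := by
    unfold pvState at h2; simp at h2
    rcases h2 with ⟨_,h⟩|⟨_,h⟩ <;> omega
  rw [hmn]
  congr 1
  omega

lemma set_pvState (k tn : Nat) (q : Int) (hk : k < tn) :
    (pvState k tn q).set k ((pvState k tn q).getD k 0 + 1) = pvState (k + 1) tn q := by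
  unfold pvState
  have hlen : (List.replicate k (q+1)).length = k := by simp
  have hrep : tn - k = (tn - (k+1)) + 1 := by omega
  rw [hrep, List.replicate_succ]
  rw [List.getD, List.getElem?_append_right (by simp)]
  simp [List.replicate_succ']

lemma adjust_pvState (m q : Int) (tn : Nat) :
    ∀ (fuel k r : Nat), k ≤ r → r < tn → r - k ≤ fuel → m = tn * q + r →
      pvAdjust m fuel (pvState k tn q) = pvState r tn q := by
  intro fuel
  induction fuel with
  | zero =>
    intro k r h1 h2 h3 h4
    have hkr : k = r := by omega
    subst hkr
    rfl
  | succ f ih =>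
    intro k r h1 h2 h3 h4
    by_cases hkr : k = r
    · subst hkr
      simp [pvAdjust, sum_pvState k tn q (by omega), h4]
    · simp only [pvAdjust]
      rw [sum_pvState k tn q (by omega), if_neg (by omega),
        min?_pvState k tn q (by omega)]
      simp only [index?_pvState k tn q (by omega)]
      rw [set_pvState k tn q (by omega)]
      exact ih (k + 1) r (by omega) h2 (by omega) h4

-- ===== VERDICT (by name: the statement is the Claim_ definition above) =====
theorem calculateTeamDistribution_spec : Claim_equal_calculateTeamDistribution := by
  intro m t _ hpre
  unfold Spec_calculateTeamDistribution
  rcases hpre with ⟨hm, ht⟩ | ⟨hm, ht⟩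
  · -- main case: 0 ≤ m, 1 ≤ t
    have ht0 : 0 < t := by omega
    unfold calculateTeamDistribution calculateTeamDistribution_alt
    simp only []
    have hfind : pvFindLastEven t m.toNat = t * (m / t) := by
      rw [findLastEven_eq t ht0 m.toNat, Int.toNat_of_nonneg hm]
    rw [hfind]
    rw [PySem.List.foldl_append_singleton_eq_map (fun _ => PySem.Int.truncdiv (t * (m / t)) t)]
    have htd : PySem.Int.truncdiv (t * (m / t)) t = m / t := by
      simp [PySem.Int.truncdiv]
      exact Int.mul_tdiv_cancel_left _ (by omega)
    rw [htd]
    rw [List.map_const', PySem.List.length_pyRange_one]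
    have hq : PySem.Int.floordiv m t = m / t := PySem.Int.floordiv_eq_ediv_of_pos ht0
    have hr : PySem.Int.mod m t = m % t := PySem.Int.mod_eq_emod_of_pos ht0
    rw [hq, hr]
    have hstart : List.replicate (t - 0).toNat (m / t) = pvState 0 t.toNat (m / t) := by
      simp [pvState]
    rw [hstart]
    have hrlt := Int.emod_lt_of_pos m ht0
    have hrge := Int.emod_nonneg m (by omega : t ≠ 0)
    have hdm := Int.mul_ediv_add_emod m t
    have hqge : 0 ≤ m / t := Int.ediv_nonneg hm (by omega)
    have hrm : m % t ≤ m := by nlinarith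
    rw [List.nil_append, adjust_pvState m (m / t) t.toNat (m.toNat + 1) 0 (m % t).toNat
      (by omega) (by omega) (by omega)
      (by rw [Int.toNat_of_nonneg (by omega : (0:Int) ≤ t), Int.toNat_of_nonneg hrge]; omega)]
    unfold pvState
    congr 1
    congr 1
    omega
  · -- corner: m = 0, t < 0 — A returns []
    subst hm
    unfold calculateTeamDistribution calculateTeamDistribution_alt
    simp only []
    rw [PySem.List.pyRange_one_eq_nil (by omega)]
    simp only [Int.toNat_zero, pvFindLastEven, List.foldl_nil]
    have h1 : pvAdjust 0 (0 + 1) [] = [] := by simp [pvAdjust]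
    rw [h1]
    have h2 : PySem.Int.mod 0 t = 0 := by simp [PySem.Int.mod]
    have h3 : PySem.Int.floordiv 0 t = 0 := by simp [PySem.Int.floordiv]
    rw [h2, h3]
    simp only [Int.toNat_zero, List.replicate_zero, List.nil_append, sub_zero]
    rw [Int.toNat_of_nonpos (by omega : t ≤ 0)]
    simp
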